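-- pv_equiv track=rewrite | github.com/jeremygenereux/CORE | BACKEND/database/repositories/player_state_repo.py | is_significantly_increasing
-- ===== SOURCE A (Python) =====
-- def is_significantly_increasing(hr_data_list: list[int]) -> bool:
--     if len(hr_data_list) < 2:
--         return False
--     # If the heart rate does not increase between the first element of the list (most recent)
--     # and the last element of the list (oldest), return False
--     if hr_data_list[0] - hr_data_list[-1] > 0:
--         # if there is any decrease between consecutive heart rates, return False
--         for i in range(1, len(hr_data_list)):
--             if hr_data_list[i - 1] - hr_data_list[i] < 0:
--                 return False
--         return True
--     else:
--         return False
-- ===== SOURCE B (Python) =====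
-- def is_significantly_increasing(hr_data_list: list[int]) -> bool:
--     if len(hr_data_list) < 2:
--         return False
--     return hr_data_list[0] > hr_data_list[-1] and hr_data_list == sorted(hr_data_list, reverse=True)
-- ===== Notes on version B (the rewrite author's own statement) =====
-- stated objective: idiomatic
-- what changed: Replaces the explicit index loop over consecutive pairs with a sort-then-compare sortedness check: the list is weakly non-increasing iff it equals its descending-sorted copy.
import Mathlib
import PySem

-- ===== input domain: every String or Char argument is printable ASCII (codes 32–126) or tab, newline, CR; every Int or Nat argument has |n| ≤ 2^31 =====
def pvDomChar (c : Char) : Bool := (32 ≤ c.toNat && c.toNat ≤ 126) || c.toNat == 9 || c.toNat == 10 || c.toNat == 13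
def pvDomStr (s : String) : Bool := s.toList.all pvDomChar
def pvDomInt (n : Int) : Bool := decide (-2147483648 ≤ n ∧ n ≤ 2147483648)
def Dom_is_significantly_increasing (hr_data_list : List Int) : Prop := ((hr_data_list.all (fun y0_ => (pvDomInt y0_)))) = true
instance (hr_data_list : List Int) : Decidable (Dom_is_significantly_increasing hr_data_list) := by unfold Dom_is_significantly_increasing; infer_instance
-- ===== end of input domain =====

-- B replaces A's explicit consecutive-pair index loop with a sort-then-compare
-- sortedness check (idiomatic; same return value everywhere).

-- ===== PORT A =====
-- the 'for i in range(1, len(..))' loop with its early 'return False'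
def pvLoopA (xs : List Int) : List Int → Bool
  | [] => true
  | i :: rest =>
    if PySem.List.pyGetD xs (i - 1) 0 - PySem.List.pyGetD xs i 0 < 0 then false
    else pvLoopA xs rest

def is_significantly_increasing (hr_data_list : List Int) : Bool :=
  if hr_data_list.length < 2 then false
  else if PySem.List.pyGetD hr_data_list 0 0 - PySem.List.pyGetD hr_data_list (-1) 0 > 0 then
    pvLoopA hr_data_list (PySem.List.pyRange 1 hr_data_list.length 1)
  else false

-- ===== PORT B =====
def is_significantly_increasing_alt (hr_data_list : List Int) : Bool :=
  if hr_data_list.length < 2 then false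
  else
    decide (PySem.List.pyGetD hr_data_list 0 0 > PySem.List.pyGetD hr_data_list (-1) 0) &&
    decide (hr_data_list = PySem.List.sorted hr_data_list (fun x => x) true)

-- ===== PRECONDITION & SPEC =====
def Spec_is_significantly_increasing (hr_data_list : List Int) (out : Bool) : Prop := out = is_significantly_increasing_alt hr_data_list
instance (hr_data_list : List Int) (out : Bool) : Decidable (Spec_is_significantly_increasing hr_data_list out) := by unfold Spec_is_significantly_increasing; infer_instance

-- ===== CLAIM (what is proved, stated in full; the proofs are below) =====
def Claim_equal_is_significantly_increasing : Prop := ∀ (hr_data_list : List Int), Dom_is_significantly_increasing hr_data_list → Spec_is_significantly_increasing hr_data_list (is_significantly_increasing hr_data_list)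

-- ===== LEMMAS AND PROOFS =====

-- A's loop returns true iff no visited index i witnesses xs[i-1] < xs[i]
theorem pvLoopA_eq_true_iff (xs : List Int) (l : List Int) :
    pvLoopA xs l = true ↔
      ∀ i ∈ l, ¬ (PySem.List.pyGetD xs (i - 1) 0 - PySem.List.pyGetD xs i 0 < 0) := by
  induction l with
  | nil => simp [pvLoopA]
  | cons i rest ih =>
    simp only [pvLoopA, List.mem_cons]
    split_ifs with h
    · simp only [false_iff]
      intro hall
      exact (hall i (Or.inl rfl)) h
    · simp only [ih]
      constructor
      · rintro hall j (rfl | hj)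
        · exact h
        · exact hall j hj
      · intro hall j hj
        exact hall j (Or.inr hj)

-- consecutive comparisons of A's loop, restated over Nat indices
theorem consec_iff (xs : List Int) :
    (∀ i ∈ PySem.List.pyRange 1 xs.length 1,
        ¬ (PySem.List.pyGetD xs (i - 1) 0 - PySem.List.pyGetD xs i 0 < 0)) ↔
      ∀ (k : Nat) (hk : k + 1 < xs.length),
        xs[k + 1]'hk ≤ xs[k]'(Nat.lt_of_succ_lt hk) := by
  constructor
  · intro h k hk
    have := h ((k : Int) + 1) (by rw [PySem.List.mem_pyRange_one]; omega)
    rw [PySem.List.pyGetD_eq_getElem xs (i := (k : Int) + 1 - 1) 0 (by omega) (by omega),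
        PySem.List.pyGetD_eq_getElem xs (i := (k : Int) + 1) 0 (by omega) (by omega)] at this
    have he1 : ((k : Int) + 1 - 1).toNat = k := by omega
    have he2 : ((k : Int) + 1).toNat = k + 1 := by omega
    simp only [he1, he2] at this
    omega
  · intro h i hi
    rw [PySem.List.mem_pyRange_one] at hi
    obtain ⟨h1, h2⟩ := hi
    rw [PySem.List.pyGetD_eq_getElem xs (i := i - 1) 0 (by omega) (by omega),
        PySem.List.pyGetD_eq_getElem xs (i := i) 0 (by omega) h2]
    have hk : (i - 1).toNat + 1 < xs.length := by omega
    have := h (i - 1).toNat hk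
    have he : (i - 1).toNat + 1 = i.toNat := by omega
    simp only [he] at this
    omega

-- weakly non-increasing ↔ each consecutive pair non-increasing
theorem pairwise_ge_iff_consec (xs : List Int) :
    xs.Pairwise (fun a b => b ≤ a) ↔
      ∀ (k : Nat) (hk : k + 1 < xs.length),
        xs[k + 1]'hk ≤ xs[k]'(Nat.lt_of_succ_lt hk) := by
  rw [List.pairwise_iff_getElem]
  constructor
  · intro h k hk
    exact h k (k + 1) (by omega) hk (by omega)
  · intro h
    have mono : ∀ (j : Nat) (hj : j < xs.length) (i : Nat) (hi : i ≤ j),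
        xs[j]'hj ≤ xs[i]'(by omega) := by
      intro j
      induction j with
      | zero => intro hj i hi; have : i = 0 := by omega
                subst this; exact le_refl _
      | succ j ih =>
        intro hj i hi
        rcases Nat.lt_or_ge i (j + 1) with hlt | hge
        · exact le_trans (h j hj) (ih (by omega) i (by omega))
        · have : i = j + 1 := by omega
          subst this; exact le_refl _
    intro i j hi hj hij
    exact mono j hj i (by omega)

-- xs equals its descending sort iff it is weakly non-increasing
theorem sorted_rev_eq_iff (xs : List Int) :
    xs = PySem.List.sorted xs (fun x => x) true ↔ xs.Pairwise (fun a b => b ≤ a) := by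
  constructor
  · intro h
    have := PySem.List.sorted_pairwise_rev (xs := xs) (key := fun x => x)
    rw [← h] at this
    exact this
  · intro h
    exact (PySem.List.sorted_rev_eq_self_of_pairwise xs (fun x => x) h).symm

-- ===== VERDICT (by name: the statement is the Claim_ definition above) =====
theorem is_significantly_increasing_spec : Claim_equal_is_significantly_increasing := by
  intro xs _
  unfold Spec_is_significantly_increasing is_significantly_increasing is_significantly_increasing_alt
  split_ifs with hlen hgt
  · rfl
  · have heq : pvLoopA xs (PySem.List.pyRange 1 xs.length 1) =
        decide (xs = PySem.List.sorted xs (fun x => x) true) := by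
      cases hP : decide (xs = PySem.List.sorted xs (fun x => x) true) with
      | true =>
        rw [pvLoopA_eq_true_iff, consec_iff]
        exact (pairwise_ge_iff_consec xs).mp ((sorted_rev_eq_iff xs).mp (of_decide_eq_true hP))
      | false =>
        have hnot := of_decide_eq_false hP
        rw [Bool.eq_false_iff, Ne, pvLoopA_eq_true_iff, consec_iff]
        intro hall
        exact hnot ((sorted_rev_eq_iff xs).mpr ((pairwise_ge_iff_consec xs).mpr hall))
    rw [heq]
    have hgt' : PySem.List.pyGetD xs 0 0 > PySem.List.pyGetD xs (-1) 0 := by omega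
    simp [hgt']
  · have hng : ¬ (PySem.List.pyGetD xs 0 0 > PySem.List.pyGetD xs (-1) 0) := by omega
    simp [hng]
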